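-- pv_equiv track=rewrite | github.com/ChrisLegaxy/Python_Bootcamp | vansenhengmeanrith17/week02/ex/30_list_sort_int.py | list_sort_int
-- ===== SOURCE A (Python) =====
-- def list_sort_int(a):
--     # Declaring a unique list
--     uniqueList = []
--     # Iterate through each elements in list (a)
--     for x in a:
--         # If the element in list (a) is a digit
--         if x.isdigit():
--             # Type cast it to int
--             x = int(x)
--             # Check if the number exist in the unique list
--             if x not in uniqueList:
--                 uniqueList.append(x)
--     # Sort the unique list with non numerical elements
--     uniqueList.sort()
--     # Return the unique list
--     return uniqueList
-- ===== SOURCE B (Python) =====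
-- def list_sort_int(a):
--     # sort first (with duplicates), then dedup by comparing adjacent elements
--     s = sorted(int(x) for x in a if x.isdigit())
--     result = []
--     for v in s:
--         if not result or result[-1] != v:
--             result.append(v)
--     return result
-- ===== Notes on version B (the rewrite author's own statement) =====
-- stated objective: alternative
-- what changed: A dedups first via a linear membership scan while collecting, then sorts; B sorts the full multiset of parsed ints first and dedups in one pass by comparing each element with the last appended one, removing the inner membership scan.
import Mathlib
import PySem

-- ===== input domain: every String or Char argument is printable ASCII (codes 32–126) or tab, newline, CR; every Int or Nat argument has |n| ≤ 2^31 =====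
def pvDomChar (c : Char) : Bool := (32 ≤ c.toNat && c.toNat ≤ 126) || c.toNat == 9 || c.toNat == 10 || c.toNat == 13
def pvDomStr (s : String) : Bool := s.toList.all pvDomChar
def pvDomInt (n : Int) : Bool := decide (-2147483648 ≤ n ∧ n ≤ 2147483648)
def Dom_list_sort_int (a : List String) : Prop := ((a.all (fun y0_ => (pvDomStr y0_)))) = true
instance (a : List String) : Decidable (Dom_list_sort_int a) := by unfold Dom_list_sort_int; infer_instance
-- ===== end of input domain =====

-- ===== PORT A =====
-- B sorts first then dedups adjacently; A dedups with a membership scan then sorts (same result).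
-- int(x) under x.isdigit() on ASCII never raises; (PySem.Int.ofStr? x).getD 0 is exact there (the default is unreachable).
def list_sort_int (a : List String) : List Int :=
  let uniqueList := a.foldl (fun u x =>
    if PySem.Str.strIsdigit x then
      (let n := (PySem.Int.ofStr? x).getD 0
       if n ∈ u then u else u ++ [n])
    else u) []
  PySem.List.sorted uniqueList (fun x => x) false

-- ===== PORT B =====
def list_sort_int_alt (a : List String) : List Int :=
  let s := PySem.List.sorted
    ((a.filter (fun x => PySem.Str.strIsdigit x)).map (fun x => (PySem.Int.ofStr? x).getD 0))
    (fun x => x) false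
  -- 'not result or result[-1] != v'  ⟺  result.getLast? ≠ some v
  s.foldl (fun r v => if r.getLast? = some v then r else r ++ [v]) []

-- ===== PRECONDITION & SPEC =====
def Spec_list_sort_int (a : List String) (out : List Int) : Prop := out = list_sort_int_alt a
instance (a : List String) (out : List Int) : Decidable (Spec_list_sort_int a out) := by unfold Spec_list_sort_int; infer_instance

-- ===== CLAIM (what is proved, stated in full; the proofs are below) =====
def Claim_equal_list_sort_int : Prop := ∀ (a : List String), Dom_list_sort_int a → Spec_list_sort_int a (list_sort_int a)

-- ===== LEMMAS AND PROOFS =====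

-- in a strictly increasing list, every element is ≤ the last one
theorem pv_le_getLast {l : List Int} {m x : Int} (hp : l.Pairwise (· < ·))
    (hl : l.getLast? = some m) (hx : x ∈ l) : x ≤ m := by
  induction l with
  | nil => simp at hx
  | cons a t ih =>
    rcases List.mem_cons.mp hx with rfl | hxt
    · cases t with
      | nil => simp at hl; omega
      | cons b u =>
        have hm : m ∈ b :: u := by
          rw [List.getLast?_cons_cons] at hl
          exact List.mem_of_getLast? hl
        have := (List.pairwise_cons.mp hp).1 m hm
        omega
    · cases t with
      | nil => simp at hxt
      | cons b u =>
        rw [List.getLast?_cons_cons] at hl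
        exact ih (List.pairwise_cons.mp hp).2 hl hxt

-- the adjacent-dedup fold: on a ≤-sorted input, starting from a compatible accumulator,
-- the result is strictly increasing and its members are acc's plus s's
theorem pv_adj_fold (s : List Int) : ∀ (acc : List Int),
    s.Pairwise (· ≤ ·) → acc.Pairwise (· < ·) →
    (∀ x ∈ acc, ∀ y ∈ s, x ≤ y) →
    (s.foldl (fun r v => if r.getLast? = some v then r else r ++ [v]) acc).Pairwise (· < ·) ∧
    ∀ z, (z ∈ s.foldl (fun r v => if r.getLast? = some v then r else r ++ [v]) acc ↔ z ∈ acc ∨ z ∈ s) := by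
  induction s with
  | nil => intro acc _ hacc _; exact ⟨hacc, by simp⟩
  | cons v t ih =>
    intro acc hs hacc hbd
    obtain ⟨hv, ht⟩ := List.pairwise_cons.mp hs
    have hstep : ∀ z, z ∈ (if acc.getLast? = some v then acc else acc ++ [v]) ↔ z ∈ acc ∨ z = v := by
      intro z
      split_ifs with h
      · constructor
        · exact Or.inl
        · rintro (hz | rfl)
          · exact hz
          · exact List.mem_of_getLast? h
      · simp
    have hpw' : (if acc.getLast? = some v then acc else acc ++ [v]).Pairwise (· < ·) := by
      split_ifs with h
      · exact hacc
      · refine List.pairwise_append.mpr ⟨hacc, by simp, ?_⟩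
        intro x hx y hy
        simp only [List.mem_singleton] at hy
        rw [hy]
        cases hm : acc.getLast? with
        | none => simp [List.getLast?_eq_none_iff] at hm; subst hm; simp at hx
        | some m =>
          have hxm : x ≤ m := pv_le_getLast hacc hm hx
          have hmv : m ≤ v := hbd m (List.mem_of_getLast? hm) v (by simp)
          have : m ≠ v := fun he => h (he ▸ hm)
          omega
    have hbd' : ∀ x ∈ (if acc.getLast? = some v then acc else acc ++ [v]), ∀ y ∈ t, x ≤ y := by
      intro x hx y hy
      rcases (hstep x).mp hx with hxa | hxv
      · exact hbd x hxa y (by simp [hy])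
      · rw [hxv]; exact hv y hy
    obtain ⟨h1, h2⟩ := ih _ ht hpw' hbd'
    refine ⟨h1, fun z => ?_⟩
    rw [List.foldl_cons, h2 z, hstep z]
    simp [or_assoc]

-- A's collecting loop builds exactly set(int(x) for x in a if x.isdigit()) in first-occurrence order
theorem pv_loop_eq_ofList (a : List String) :
    a.foldl (fun u x =>
      if PySem.Str.strIsdigit x then
        (let n := (PySem.Int.ofStr? x).getD 0
         if n ∈ u then u else u ++ [n])
      else u) [] =
    PySem.Set.ofList ((a.filter (fun x => PySem.Str.strIsdigit x)).map (fun x => (PySem.Int.ofStr? x).getD 0)) := by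
  rw [PySem.List.foldl_if_eq_foldl_filter (p := fun x => PySem.Str.strIsdigit x)
    (f := fun u x => let n := (PySem.Int.ofStr? x).getD 0; if n ∈ u then u else u ++ [n])]
  rw [PySem.Set.ofList_eq_foldl, List.foldl_map]
  apply PySem.List.foldl_congr_mem
  intro acc x _
  simp [PySem.Set.add, PySem.Set.contains]

-- ===== VERDICT (by name: the statement is the Claim_ definition above) =====
theorem list_sort_int_spec : Claim_equal_list_sort_int := by
  intro a _
  unfold Spec_list_sort_int list_sort_int list_sort_int_alt
  rw [pv_loop_eq_ofList]
  set L := (a.filter (fun x => PySem.Str.strIsdigit x)).map (fun x => (PySem.Int.ofStr? x).getD 0) with hL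
  obtain ⟨hpw, hmem⟩ := pv_adj_fold (PySem.List.sorted L (fun x => x) false) []
    (PySem.List.sorted_pairwise L (fun x => x)) (List.Pairwise.nil) (by simp)
  refine PySem.List.sorted_eq_of_perm_of_pairwise_lt _ _ _ ?_ hpw
  refine (List.perm_ext_iff_of_nodup ?_ (PySem.Set.nodup_ofList _)).mpr ?_
  · exact hpw.nodup
  · intro z
    rw [hmem z, PySem.Set.mem_ofList, PySem.List.mem_sorted]
    simp
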